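-- pv_equiv track=rewrite | github.com/wwwyo/atcoder | morning/9.20/d.py | dfs
-- ===== SOURCE A (Python) =====
-- def checkLand(map_):
--     for i in range(10):
--         for j in range(10):
--             if map_[i][j] == 'o':
--                 return [i,j]
--     return []
--
-- def dfs(map_):
--     t,l = checkLand(map_)
--
--     stack = set()
--     stack.add((t,l))
--     while len(stack) > 0:
--         i,j = stack.pop()
--         for dx,dy in [(-1,0),(1,0),(0,-1),(0,1)]:
--             x = i + dx
--             y = j + dy
--             if 0 <= x < 10 and 0 <= y < 10:
--                 if map_[x][y] == 'o':
--                     map_[x][y] = 'x'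
--                     stack.add((x,y))
--     if not checkLand(map_):
--         return True
--     else:
--         return False
-- ===== SOURCE B (Python) =====
-- def dfs(map_):
--     t, l = next(([i, j] for i in range(10) for j in range(10) if map_[i][j] == 'o'), [])
--
--     def flood(i, j):
--         for x, y in ((i - 1, j), (i + 1, j), (i, j - 1), (i, j + 1)):
--             if 0 <= x < 10 and 0 <= y < 10 and map_[x][y] == 'o':
--                 map_[x][y] = 'x'
--                 flood(x, y)
--
--     flood(t, l)
--     return not any(map_[i][j] == 'o' for i in range(10) for j in range(10))
-- ===== Notes on version B (the rewrite author's own statement) =====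
-- stated objective: alternative
-- what changed: The explicit set-based worklist loop is replaced by a recursive depth-first flood helper (which, like A, marks each neighbour on discovery and never marks the start cell on entry), and the two full-grid scans become lazy generator searches (next/any) instead of index loops with early return.
import Mathlib
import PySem

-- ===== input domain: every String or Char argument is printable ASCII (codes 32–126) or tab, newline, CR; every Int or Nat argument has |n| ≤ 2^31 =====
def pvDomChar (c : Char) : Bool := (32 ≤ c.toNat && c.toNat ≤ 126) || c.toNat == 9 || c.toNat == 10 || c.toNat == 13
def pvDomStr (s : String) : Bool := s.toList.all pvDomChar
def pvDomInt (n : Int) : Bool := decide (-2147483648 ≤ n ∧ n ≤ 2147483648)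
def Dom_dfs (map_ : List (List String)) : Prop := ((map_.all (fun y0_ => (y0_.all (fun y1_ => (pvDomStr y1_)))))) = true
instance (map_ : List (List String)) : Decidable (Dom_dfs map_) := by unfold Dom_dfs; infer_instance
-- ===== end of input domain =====

-- B is an alternative decomposition: a recursive depth-first flood helper replaces A's set-worklist
-- loop, and lazy searches replace the scanning loops; like A it marks neighbours on discovery (never
-- the start cell on entry).  Both Pythons mutate map_ in place identically; the equivalence proved
-- here is about the RETURN value.  Python's set.pop order is unspecified; port A pops the head —
-- the theorem below shows the result does not depend on the processing order.

-- shared low-level grid access (exact Python indexing via PySem; all uses are guarded to 0 ≤ index)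
def gAt (g : List (List String)) (x y : Int) : String :=
  PySem.List.pyGetD (PySem.List.pyGetD g x []) y ""

def setCell (g : List (List String)) (x y : Int) : List (List String) :=
  PySem.List.pySetD g x (PySem.List.pySetD (PySem.List.pyGetD g x []) y "x")

def countO (g : List (List String)) : Nat :=
  (g.map (fun row => row.count "o")).sum

-- ===== PORT A =====
def checkLandRow (g : List (List String)) (i : Int) : List Int → Option Int
  | [] => none
  | j :: js => if gAt g i j == "o" then some j else checkLandRow g i js

def checkLandGo (g : List (List String)) : List Int → List Int
  | [] => []
  | i :: is =>
    match checkLandRow g i (PySem.List.pyRange 0 10 1) with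
    | some j => [i, j]
    | none => checkLandGo g is

def checkLand (g : List (List String)) : List Int :=
  checkLandGo g (PySem.List.pyRange 0 10 1)

def dirsA : List (Int × Int) := [(-1, 0), (1, 0), (0, -1), (0, 1)]

-- the inner 'for dx,dy in dirs' loop: marks each in-window 'o' neighbour and collects it (in order)
def expand (g : List (List String)) (i j : Int) :
    List (Int × Int) → (List (List String)) × List (Int × Int)
  | [] => (g, [])
  | (dx, dy) :: ds =>
    let x := i + dx
    let y := j + dy
    if 0 ≤ x ∧ x < 10 ∧ 0 ≤ y ∧ y < 10 ∧ gAt g x y == "o" then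
      let r := expand (setCell g x y) i j ds
      (r.1, (x, y) :: r.2)
    else expand g i j ds

-- the 'while len(stack) > 0' loop; fuel only makes it total (2*countO+|stack|+1 is proved sufficient)
def loopA : Nat → List (List String) → List (Int × Int) → List (List String)
  | 0, g, _ => g
  | _ + 1, g, [] => g
  | f + 1, g, (i, j) :: rest =>
    let r := expand g i j dirsA
    loopA f r.1 (r.2.foldl PySem.Set.add rest)

def dfs (map_ : List (List String)) : Bool :=
  match checkLand map_ with
  | [t, l] =>
    let g := loopA (2 * countO map_ + 2) map_ (PySem.Set.add PySem.Set.empty (t, l))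
    if checkLand g = [] then true else false
  | _ => false   -- Python raises ValueError unpacking here; excluded by Pre_dfs

-- ===== PORT B =====
def cellsB : List (Int × Int) :=
  (PySem.List.pyRange 0 10 1).flatMap fun i =>
    (PySem.List.pyRange 0 10 1).map fun j => (i, j)

def findLand (g : List (List String)) : Option (Int × Int) :=
  cellsB.find? fun c => gAt g c.1 c.2 == "o"

def nbrs (i j : Int) : List (Int × Int) := [(i - 1, j), (i + 1, j), (i, j - 1), (i, j + 1)]

-- recursive flood: marks each candidate neighbour that is in-window 'o', then recurses into it;
-- fuel only makes it total (5*countO+|pending| is proved sufficient)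
def floodGo : Nat → List (List String) → List (Int × Int) → List (List String)
  | 0, g, _ => g
  | _ + 1, g, [] => g
  | f + 1, g, (x, y) :: L =>
    if 0 ≤ x ∧ x < 10 ∧ 0 ≤ y ∧ y < 10 ∧ gAt g x y == "o" then
      floodGo f (floodGo f (setCell g x y) (nbrs x y)) L
    else floodGo f g L

def dfs_alt (map_ : List (List String)) : Bool :=
  match findLand map_ with
  | some (t, l) =>
    let g := floodGo (5 * countO map_ + 4) map_ (nbrs t l)
    !(cellsB.any fun c => gAt g c.1 c.2 == "o")
  | none => false   -- Python raises ValueError unpacking here; excluded by Pre_dfs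

-- ===== PRECONDITION & SPEC =====
-- Pre_dfs describes the inputs on which the Python A returns normally: either (a) a full 10×10
-- window containing an 'o' (then every index A touches exists), or (b) the row-major scan safely
-- reaches a first 'o' whose in-window down/right neighbours exist and are not 'o' (an isolated
-- start: the flood is a no-op and the rescan re-finds it).  Excluded are the inputs where A raises
-- (IndexError on ragged grids, ValueError unpacking [] when no 'o' is found) and, to keep the
-- condition closed-form, ragged grids on which a non-trivial flood happens to stay in range.
def Pre_dfs (map_ : List (List String)) : Prop :=
  (10 ≤ map_.length ∧ (∀ row ∈ map_.take 10, 10 ≤ row.length) ∧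
    ∃ i ∈ List.range 10, ∃ j ∈ List.range 10, (map_.getD i []).getD j "" = "o") ∨
  (∃ t ∈ List.range 10, ∃ l ∈ List.range 10,
    (∀ i ∈ List.range 10, i < t → 10 ≤ (map_.getD i []).length ∧
      (∀ j ∈ List.range 10, (map_.getD i []).getD j "" ≠ "o")) ∧
    t < map_.length ∧ l < (map_.getD t []).length ∧ (map_.getD t []).getD l "" = "o" ∧
    (∀ j ∈ List.range 10, j < l → (map_.getD t []).getD j "" ≠ "o") ∧
    (t + 1 < 10 → t + 1 < map_.length ∧ l < (map_.getD (t + 1) []).length ∧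
      (map_.getD (t + 1) []).getD l "" ≠ "o") ∧
    (l + 1 < 10 → l + 1 < (map_.getD t []).length ∧ (map_.getD t []).getD (l + 1) "" ≠ "o"))
instance (map_ : List (List String)) : Decidable (Pre_dfs map_) := by
  unfold Pre_dfs; infer_instance

def pvWitness_dfs : List (List String) :=
  [["o", "o", "x", "x", "x", "x", "x", "x", "x", "x"],
   ["x", "x", "x", "x", "x", "x", "x", "x", "x", "x"],
   ["x", "x", "x", "x", "x", "x", "x", "x", "x", "x"],
   ["x", "x", "x", "x", "x", "x", "x", "x", "x", "x"],
   ["x", "x", "x", "x", "x", "x", "x", "x", "x", "x"],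
   ["x", "x", "x", "x", "x", "x", "x", "x", "x", "x"],
   ["x", "x", "x", "x", "x", "x", "x", "x", "x", "x"],
   ["x", "x", "x", "x", "x", "x", "x", "x", "x", "x"],
   ["x", "x", "x", "x", "x", "x", "x", "x", "x", "x"],
   ["x", "x", "x", "x", "x", "x", "x", "x", "x", "x"]]

def Spec_dfs (map_ : List (List String)) (out : Bool) : Prop := out = dfs_alt map_
instance (map_ : List (List String)) (out : Bool) : Decidable (Spec_dfs map_ out) := by
  unfold Spec_dfs; infer_instance

-- ===== CLAIM (what is proved, stated in full; the proofs are below) =====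
def Claim_equal_dfs : Prop :=
  ∀ (map_ : List (List String)), Dom_dfs map_ → Pre_dfs map_ → Spec_dfs map_ (dfs map_)

-- ===== LEMMAS AND PROOFS =====

def Win (c : Int × Int) : Prop := 0 ≤ c.1 ∧ c.1 < 10 ∧ 0 ≤ c.2 ∧ c.2 < 10

-- cells flipped by a flood started from pending list L on grid g: the least set containing every
-- in-window 'o' cell of L and closed under in-window 'o' neighbours
inductive ReachL (g : List (List String)) (L : List (Int × Int)) : (Int × Int) → Prop
  | base {c} : c ∈ L → Win c → gAt g c.1 c.2 = "o" → ReachL g L c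
  | step {d c} : ReachL g L d → c ∈ nbrs d.1 d.2 → Win c → gAt g c.1 c.2 = "o" → ReachL g L c

def Flips (g g' : List (List String)) (M : (Int × Int) → Prop) : Prop :=
  ∀ c, Win c → (M c → gAt g' c.1 c.2 = "x") ∧ (¬ M c → gAt g' c.1 c.2 = gAt g c.1 c.2)

theorem getD_set_lt {α : Type} (l : List α) (i : Nat) (a d : α) (h : i < l.length) :
    (l.set i a).getD i d = a := by
  rw [List.getD_eq_getElem?_getD, List.getElem?_set_self h, Option.getD_some]

theorem getD_set_ne {α : Type} (l : List α) {i j : Nat} (a d : α) (h : i ≠ j) :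
    (l.set i a).getD j d = l.getD j d := by
  rw [List.getD_eq_getElem?_getD, List.getElem?_set_ne h, ← List.getD_eq_getElem?_getD]

theorem getD_ge {α : Type} (l : List α) (i : Nat) (d : α) (h : l.length ≤ i) :
    l.getD i d = d := by
  rw [List.getD_eq_getElem?_getD, List.getElem?_eq_none h, Option.getD_none]

theorem gAt_o_bounds {g : List (List String)} {x y : Int} (hx : 0 ≤ x) (hy : 0 ≤ y)
    (h : gAt g x y = "o") :
    x.toNat < g.length ∧ y.toNat < (g.getD x.toNat []).length := by
  unfold gAt at h
  rw [PySem.List.pyGetD_of_nonneg _ _ hx, PySem.List.pyGetD_of_nonneg _ _ hy] at h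
  have hxl : x.toNat < g.length := by
    by_contra hc
    rw [getD_ge g _ _ (by omega)] at h
    simp at h
  refine ⟨hxl, ?_⟩
  by_contra hc
  rw [getD_ge (g.getD x.toNat []) _ _ (by omega)] at h
  simp at h

theorem gAt_set_self {g : List (List String)} {x y : Int} (hx : 0 ≤ x) (hy : 0 ≤ y)
    (h : gAt g x y = "o") : gAt (setCell g x y) x y = "x" := by
  obtain ⟨hxl, hyl⟩ := gAt_o_bounds hx hy h
  unfold gAt setCell
  rw [PySem.List.pySetD_of_nonneg _ _ hx, PySem.List.pySetD_of_nonneg _ _ hy,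
    PySem.List.pyGetD_of_nonneg _ _ hx, PySem.List.pyGetD_of_nonneg _ _ hy,
    PySem.List.pyGetD_of_nonneg _ _ hx]
  rw [getD_set_lt _ _ _ _ hxl, getD_set_lt _ _ _ _ hyl]

theorem gAt_set_other {g : List (List String)} {x y x' y' : Int} (hx : 0 ≤ x) (hy : 0 ≤ y)
    (hx' : 0 ≤ x') (hy' : 0 ≤ y') (hne : (x, y) ≠ (x', y')) :
    gAt (setCell g x y) x' y' = gAt g x' y' := by
  unfold gAt setCell
  rw [PySem.List.pySetD_of_nonneg _ _ hx, PySem.List.pySetD_of_nonneg _ _ hy,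
    PySem.List.pyGetD_of_nonneg _ _ hx, PySem.List.pyGetD_of_nonneg _ _ hx',
    PySem.List.pyGetD_of_nonneg _ _ hy', PySem.List.pyGetD_of_nonneg _ _ hx',
    PySem.List.pyGetD_of_nonneg _ _ hy']
  by_cases hxx : x.toNat = x'.toNat
  · have hxe : x = x' := by omega
    have hyy : y.toNat ≠ y'.toNat := by
      have : y ≠ y' := by
        intro he
        exact hne (by rw [hxe, he])
      omega
    by_cases hxlen : x.toNat < g.length
    · rw [hxx, getD_set_lt _ _ _ _ (by omega), ← hxx, getD_set_ne _ _ _ hyy]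
    · rw [List.set_eq_of_length_le (by omega)]
  · rw [getD_set_ne _ _ _ hxx]

theorem sum_set_nat (l : List Nat) (i : Nat) (a : Nat) (h : i < l.length) :
    (l.set i a).sum + l[i] = l.sum + a := by
  induction l generalizing i with
  | nil => simp at h
  | cons b t ih =>
    cases i with
    | zero => simp [List.set]; omega
    | succ k =>
      simp only [List.set, List.sum_cons, List.getElem_cons_succ]
      have := ih k (by simpa using h)
      omega

theorem countO_set {g : List (List String)} {x y : Int} (hx : 0 ≤ x) (hy : 0 ≤ y)
    (h : gAt g x y = "o") : countO (setCell g x y) + 1 = countO g := by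
  obtain ⟨hxl, hyl⟩ := gAt_o_bounds hx hy h
  unfold gAt at h
  rw [PySem.List.pyGetD_of_nonneg _ _ hx, PySem.List.pyGetD_of_nonneg _ _ hy] at h
  set row := g.getD x.toNat [] with hrow
  have hcell : row[y.toNat] = "o" := by
    rw [List.getD_eq_getElem?_getD (l := row), List.getElem?_eq_getElem hyl,
      Option.getD_some] at h
    exact h
  unfold countO setCell
  rw [PySem.List.pySetD_of_nonneg _ _ hx, PySem.List.pySetD_of_nonneg _ _ hy,
    PySem.List.pyGetD_of_nonneg _ _ hx, List.map_set]
  rw [← hrow]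
  have hs := sum_set_nat (g.map fun r => r.count "o") x.toNat
    ((row.set y.toNat "x").count "o") (by simpa using hxl)
  have hg : (g.map fun r => r.count "o")[x.toNat]'(by simpa using hxl) = row.count "o" := by
    rw [List.getElem_map, hrow, List.getD_eq_getElem?_getD (l := g),
      List.getElem?_eq_getElem hxl, Option.getD_some]
  rw [hg] at hs
  have hcnt : (row.set y.toNat "x").count "o" + 1 = row.count "o" := by
    rw [List.count_set hyl, hcell]
    have hpos : 0 < row.count "o" := by
      apply List.count_pos_iff.2
      rw [← hcell]
      exact List.getElem_mem hyl
    simp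
    omega
  omega

theorem reach_nil {g : List (List String)} {c : Int × Int} : ¬ ReachL g [] c := by
  intro h; induction h with
  | base hm _ _ => simp at hm
  | step _ _ _ _ ih => exact ih

theorem reach_mono {g : List (List String)} {L : List (Int × Int)} {e c : Int × Int}
    (h : ReachL g L c) : ReachL g (e :: L) c := by
  induction h with
  | base hm hw ho => exact ReachL.base (List.mem_cons_of_mem _ hm) hw ho
  | step _ hn hw ho ih => exact ReachL.step ih hn hw ho

theorem reach_drop {g : List (List String)} {L : List (Int × Int)} {e c : Int × Int}
    (he : ¬ (Win e ∧ gAt g e.1 e.2 = "o")) (h : ReachL g (e :: L) c) : ReachL g L c := by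
  induction h with
  | base hm hw ho =>
    rcases List.mem_cons.1 hm with rfl | hm
    · exact absurd ⟨hw, ho⟩ he
    · exact ReachL.base hm hw ho
  | step _ hn hw ho ih => exact ReachL.step ih hn hw ho

theorem ne_of_mem_nbrs {c : Int × Int} {a b : Int} (h : c ∈ nbrs a b) : c ≠ (a, b) := by
  simp [nbrs] at h
  rcases h with rfl | rfl | rfl | rfl <;> (intro he; injection he with h1 h2; omega)

theorem floodGo_countO_le (f : Nat) (g : List (List String)) (L : List (Int × Int)) :
    countO (floodGo f g L) ≤ countO g := by
  induction f generalizing g L with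
  | zero => simp [floodGo]
  | succ f ih =>
    match L with
    | [] => simp [floodGo]
    | (x, y) :: L =>
      rw [floodGo]
      split
      · rename_i hcond
        obtain ⟨hx, _, hy, _, ho⟩ := hcond
        have ho' : gAt g x y = "o" := by simpa using ho
        have h1 := ih (floodGo f (setCell g x y) (nbrs x y)) L
        have h2 := ih (setCell g x y) (nbrs x y)
        have h3 := countO_set hx hy ho'
        omega
      · exact ih g L

theorem reach_split {g G1 : List (List String)} {e : Int × Int} {L : List (Int × Int)}
    (hwin : Win e) (ho : gAt g e.1 e.2 = "o")
    (hF : Flips (setCell g e.1 e.2) G1 (ReachL (setCell g e.1 e.2) (nbrs e.1 e.2))) :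
    ∀ c, ReachL g (e :: L) c ↔
      (c = e ∨ ReachL (setCell g e.1 e.2) (nbrs e.1 e.2) c ∨ ReachL G1 L c) := by
  have hxe : gAt (setCell g e.1 e.2) e.1 e.2 = "x" :=
    gAt_set_self hwin.1 hwin.2.2.1 ho
  have gweak : ∀ c : Int × Int, Win c → c ≠ e →
      gAt (setCell g e.1 e.2) c.1 c.2 = gAt g c.1 c.2 := by
    intro c hw hne
    exact gAt_set_other hwin.1 hwin.2.2.1 hw.1 hw.2.2.1
      (fun he => hne (by rw [Prod.ext_iff] at he ⊢; exact ⟨he.1.symm, he.2.symm⟩))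
  have hG1at : ∀ c : Int × Int, Win c → gAt G1 c.1 c.2 = "o" →
      gAt (setCell g e.1 e.2) c.1 c.2 = "o" := by
    intro c hw h
    by_cases hr : ReachL (setCell g e.1 e.2) (nbrs e.1 e.2) c
    · rw [(hF c hw).1 hr] at h; simp at h
    · rw [← (hF c hw).2 hr]; exact h
  intro c
  constructor
  · intro h
    induction h with
    | base hm hw ho' =>
      rename_i c'
      rcases List.mem_cons.1 hm with rfl | hm
      · exact Or.inl rfl
      · by_cases hce : c' = e
        · exact Or.inl hce
        · by_cases hr1 : ReachL (setCell g e.1 e.2) (nbrs e.1 e.2) c'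
          · exact Or.inr (Or.inl hr1)
          · refine Or.inr (Or.inr (ReachL.base hm hw ?_))
            rw [(hF c' hw).2 hr1, gweak c' hw hce]
            exact ho'
    | step hd hn hw ho' ih =>
      rename_i d c'
      by_cases hce : c' = e
      · exact Or.inl hce
      · rcases ih with rfl | h1 | h2
        · exact Or.inr (Or.inl (ReachL.base hn hw (by rw [gweak c' hw hce]; exact ho')))
        · exact Or.inr (Or.inl (ReachL.step h1 hn hw (by rw [gweak c' hw hce]; exact ho')))
        · by_cases hr1 : ReachL (setCell g e.1 e.2) (nbrs e.1 e.2) c'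
          · exact Or.inr (Or.inl hr1)
          · refine Or.inr (Or.inr (ReachL.step h2 hn hw ?_))
            rw [(hF c' hw).2 hr1, gweak c' hw hce]
            exact ho'
  · rintro (rfl | h1 | h2)
    · exact ReachL.base List.mem_cons_self hwin ho
    · induction h1 with
      | base hm hw ho' =>
        rename_i c'
        have hne : c' ≠ (e.1, e.2) := ne_of_mem_nbrs hm
        have hne' : c' ≠ e := by rwa [Prod.mk.eta] at hne
        exact ReachL.step (ReachL.base List.mem_cons_self hwin ho) hm hw
          (by rw [← gweak _ hw hne']; exact ho')
      | step hd hn hw ho' ih =>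
        rename_i d c'
        by_cases hce : c' = e
        · subst hce
          rw [hxe] at ho'
          simp at ho'
        · exact ReachL.step ih hn hw (by rw [← gweak c' hw hce]; exact ho')
    · induction h2 with
      | base hm hw ho' =>
        rename_i c'
        have ho1 := hG1at _ hw ho'
        have hce : c' ≠ e := by
          intro he
          rw [he] at ho1
          rw [hxe] at ho1
          simp at ho1
        exact ReachL.base (List.mem_cons_of_mem _ hm) hw (by rw [← gweak _ hw hce]; exact ho1)
      | step hd hn hw ho' ih =>
        rename_i d c'
        have ho1 := hG1at _ hw ho'
        have hce : c' ≠ e := by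
          intro he
          rw [he] at ho1
          rw [hxe] at ho1
          simp at ho1
        exact ReachL.step ih hn hw (by rw [← gweak c' hw hce]; exact ho1)

-- characterization of B's recursive flood
theorem flips_nil (g g' : List (List String)) (h : g' = g) :
    Flips g g' (ReachL g []) := by
  subst h
  intro c hw
  exact ⟨fun h => absurd h reach_nil, fun _ => rfl⟩

theorem flood_char (f : Nat) : ∀ (g : List (List String)) (L : List (Int × Int)),
    5 * countO g + L.length ≤ f → Flips g (floodGo f g L) (ReachL g L) := by
  induction f with
  | zero =>
    intro g L hf
    have hL : L = [] := by
      cases L with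
      | nil => rfl
      | cons a l => simp at hf
    subst hL
    exact flips_nil _ _ (by rw [floodGo])
  | succ f ih =>
    intro g L hf
    match L with
    | [] => exact flips_nil _ _ (by rw [floodGo])
    | (x, y) :: L =>
      rw [floodGo]
      split
      · rename_i hcond
        obtain ⟨hx, hx10, hy, hy10, hob⟩ := hcond
        have ho : gAt g x y = "o" := by simpa using hob
        have hwin : Win (x, y) := ⟨hx, hx10, hy, hy10⟩
        have hco : countO (setCell g x y) + 1 = countO g := countO_set hx hy ho
        have hlen4 : (nbrs x y).length = 4 := by simp [nbrs]
        have hF1 : Flips (setCell g x y) (floodGo f (setCell g x y) (nbrs x y))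
            (ReachL (setCell g x y) (nbrs x y)) := by
          apply ih
          rw [hlen4]
          simp at hf
          omega
        have hcoG1 : countO (floodGo f (setCell g x y) (nbrs x y)) ≤ countO (setCell g x y) :=
          floodGo_countO_le f _ _
        have hF2 : Flips (floodGo f (setCell g x y) (nbrs x y))
            (floodGo f (floodGo f (setCell g x y) (nbrs x y)) L)
            (ReachL (floodGo f (setCell g x y) (nbrs x y)) L) := by
          apply ih
          simp at hf
          omega
        have hsplit := reach_split (g := g) (e := (x, y)) (L := L) (G1 := floodGo f (setCell g x y) (nbrs x y)) hwin ho hF1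
        intro c hw
        constructor
        · intro hreach
          rcases (hsplit c).1 hreach with rfl | h1 | h2
          · by_cases hr2 : ReachL (floodGo f (setCell g x y) (nbrs x y)) L (x, y)
            · exact (hF2 _ hw).1 hr2
            · rw [(hF2 _ hw).2 hr2]
              by_cases hr1 : ReachL (setCell g x y) (nbrs x y) (x, y)
              · exact (hF1 _ hw).1 hr1
              · rw [(hF1 _ hw).2 hr1]
                exact gAt_set_self hx hy ho
          · by_cases hr2 : ReachL (floodGo f (setCell g x y) (nbrs x y)) L c
            · exact (hF2 _ hw).1 hr2
            · rw [(hF2 _ hw).2 hr2]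
              exact (hF1 _ hw).1 h1
          · exact (hF2 _ hw).1 h2
        · intro hn
          have hne : c ≠ (x, y) := fun he => hn ((hsplit c).2 (Or.inl he))
          have h1 : ¬ ReachL (setCell g x y) (nbrs x y) c :=
            fun h => hn ((hsplit c).2 (Or.inr (Or.inl h)))
          have h2 : ¬ ReachL (floodGo f (setCell g x y) (nbrs x y)) L c :=
            fun h => hn ((hsplit c).2 (Or.inr (Or.inr h)))
          rw [(hF2 _ hw).2 h2, (hF1 _ hw).2 h1]
          exact gAt_set_other hx hy hw.1 hw.2.2.1
            (fun he => hne (by rw [Prod.ext_iff] at he ⊢; exact ⟨he.1.symm, he.2.symm⟩))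
      · rename_i hc
        have hnot : ¬ (Win (x, y) ∧ gAt g x y = "o") := by
          rintro ⟨⟨a, b, c, d⟩, e⟩
          exact hc ⟨a, b, c, d, by simpa using e⟩
        have hrec : Flips g (floodGo f g L) (ReachL g L) := by
          apply ih
          simp at hf
          omega
        intro c hw
        refine ⟨fun h => (hrec c hw).1 (reach_drop hnot h), fun h => (hrec c hw).2 ?_⟩
        exact fun h' => h (reach_mono h')

theorem expand_spec (i j : Int) : ∀ (ds : List (Int × Int)) (g : List (List String)),
    (ds.map fun d => (i + d.1, j + d.2)).Pairwise (· ≠ ·) →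
    (∀ c ∈ (expand g i j ds).2,
      Win c ∧ gAt g c.1 c.2 = "o" ∧ c ∈ ds.map fun d => (i + d.1, j + d.2)) ∧
    (∀ c ∈ ds.map (fun d => (i + d.1, j + d.2)), Win c → gAt g c.1 c.2 = "o" →
      c ∈ (expand g i j ds).2) ∧
    (∀ c, Win c → gAt (expand g i j ds).1 c.1 c.2 =
      (if c ∈ (expand g i j ds).2 then "x" else gAt g c.1 c.2)) ∧
    countO (expand g i j ds).1 + (expand g i j ds).2.length = countO g := by
  intro ds
  induction ds with
  | nil =>
    intro g _
    refine ⟨by simp [expand], by simp [expand], ?_, by simp [expand]⟩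
    intro c _
    simp [expand]
  | cons d0 ds ih =>
    intro g hpw
    obtain ⟨dx, dy⟩ := d0
    have hhead : ∀ c ∈ ds.map (fun d => (i + d.1, j + d.2)), (i + dx, j + dy) ≠ c := by
      simpa using (List.pairwise_cons.1 hpw).1
    have htail := (List.pairwise_cons.1 hpw).2
    simp only [expand]
    split
    · rename_i hcond
      obtain ⟨hx, hx10, hy, hy10, hob⟩ := hcond
      have ho : gAt g (i + dx) (j + dy) = "o" := by simpa using hob
      have hwin : Win (i + dx, j + dy) := ⟨hx, hx10, hy, hy10⟩
      have hxe : gAt (setCell g (i + dx) (j + dy)) (i + dx) (j + dy) = "x" :=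
        gAt_set_self hx hy ho
      have hco : countO (setCell g (i + dx) (j + dy)) + 1 = countO g := countO_set hx hy ho
      obtain ⟨ih1, ih2, ih3, ih4⟩ := ih (setCell g (i + dx) (j + dy)) htail
      have hother : ∀ c : Int × Int, Win c → c ≠ (i + dx, j + dy) →
          gAt (setCell g (i + dx) (j + dy)) c.1 c.2 = gAt g c.1 c.2 := by
        intro c hw hne
        exact gAt_set_other hx hy hw.1 hw.2.2.1
          (fun he => hne (by rw [Prod.ext_iff] at he ⊢; exact ⟨he.1.symm, he.2.symm⟩))
      have hmemx : (i + dx, j + dy) ∉ (expand (setCell g (i + dx) (j + dy)) i j ds).2 := by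
        intro hm
        have := (ih1 _ hm).2.1
        rw [hxe] at this
        simp at this
      refine ⟨?_, ?_, ?_, ?_⟩
      · intro c hc
        rcases List.mem_cons.1 hc with rfl | hc
        · exact ⟨hwin, ho, by simp⟩
        · obtain ⟨hw, ho1, hm⟩ := ih1 c hc
          have hne : c ≠ (i + dx, j + dy) := by
            rintro rfl
            rw [hxe] at ho1
            simp at ho1
          rw [hother c hw hne] at ho1
          exact ⟨hw, ho1, List.mem_cons_of_mem _ hm⟩
      · intro c hc hw ho'
        rcases List.mem_cons.1 hc with rfl | hc
        · exact List.mem_cons_self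
        · have hne : c ≠ (i + dx, j + dy) := fun he => (hhead c hc) he.symm
          refine List.mem_cons_of_mem _ (ih2 c hc hw ?_)
          rw [hother c hw hne]
          exact ho'
      · intro c hw
        by_cases hce : c = (i + dx, j + dy)
        · subst hce
          rw [ih3 _ hw, if_neg hmemx, hxe, if_pos List.mem_cons_self]
        · rw [ih3 c hw]
          by_cases hm : c ∈ (expand (setCell g (i + dx) (j + dy)) i j ds).2
          · rw [if_pos hm, if_pos (List.mem_cons_of_mem _ hm)]
          · rw [if_neg hm, if_neg (by
              intro hmc
              rcases List.mem_cons.1 hmc with h | h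
              · exact hce h
              · exact hm h), hother c hw hce]
      · simp only [List.length_cons]
        omega
    · rename_i hcond
      have hnot : ¬ (Win (i + dx, j + dy) ∧ gAt g (i + dx) (j + dy) = "o") := by
        rintro ⟨⟨a, b, c, d⟩, e⟩
        exact hcond ⟨a, b, c, d, by simpa using e⟩
      obtain ⟨ih1, ih2, ih3, ih4⟩ := ih g htail
      refine ⟨?_, ?_, ih3, ih4⟩
      · intro c hc
        obtain ⟨hw, ho1, hm⟩ := ih1 c hc
        exact ⟨hw, ho1, List.mem_cons_of_mem _ hm⟩
      · intro c hc hw ho'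
        rcases List.mem_cons.1 hc with rfl | hc
        · exact absurd ⟨hw, ho'⟩ hnot
        · exact ih2 c hc hw ho'

theorem len_foldl_add (ns : List (Int × Int)) : ∀ (s : List (Int × Int)),
    (ns.foldl PySem.Set.add s).length ≤ s.length + ns.length := by
  induction ns with
  | nil => intro s; simp
  | cons a ns ih =>
    intro s
    have h1 := ih (PySem.Set.add s a)
    have h2 : (PySem.Set.add s a).length ≤ s.length + 1 := by
      unfold PySem.Set.add
      split <;> simp
    simp only [List.foldl_cons, List.length_cons]
    omega

theorem mem_set_add {s : List (Int × Int)} {a c : Int × Int} :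
    c ∈ PySem.Set.add s a ↔ c ∈ s ∨ c = a := by
  unfold PySem.Set.add
  split
  · rename_i h
    constructor
    · exact Or.inl
    · rintro (h' | rfl)
      · exact h'
      · simpa using h
  · simp

theorem mem_foldl_add (ns : List (Int × Int)) : ∀ (s : List (Int × Int)) (c : Int × Int),
    c ∈ ns.foldl PySem.Set.add s ↔ c ∈ s ∨ c ∈ ns := by
  induction ns with
  | nil => intro s c; simp
  | cons a ns ih =>
    intro s c
    simp only [List.foldl_cons, ih, mem_set_add, List.mem_cons]
    tauto

theorem dirsA_shift (i j : Int) :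
    dirsA.map (fun d => (i + d.1, j + d.2)) = nbrs i j := by
  simp [dirsA, nbrs, sub_eq_add_neg]

theorem nbrs_pairwise (i j : Int) :
    (nbrs i j).Pairwise (· ≠ ·) := by
  simp only [nbrs]
  refine List.Pairwise.cons ?_ (List.Pairwise.cons ?_ (List.Pairwise.cons ?_
    (List.pairwise_singleton _ _)))
  all_goals
    intro c hc he
    subst he
    simp [Prod.ext_iff] at hc
    try omega

-- the invariant for A's worklist loop
theorem loopA_char (g0 : List (List String)) (s : Int × Int) (f : Nat) :
    ∀ (g : List (List String)) (S : List (Int × Int)) (M : (Int × Int) → Prop),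
    2 * countO g + S.length + 1 ≤ f →
    Flips g0 g M →
    (∀ c, M c → ReachL g0 (nbrs s.1 s.2) c) →
    (∀ c ∈ S, M c ∨ c = s) →
    (∀ c d, Win c → gAt g0 c.1 c.2 = "o" → ¬ M c → c ∈ nbrs d.1 d.2 →
      (M d ∨ d = s) → d ∉ S → False) →
    Flips g0 (loopA f g S) (ReachL g0 (nbrs s.1 s.2)) := by
  induction f with
  | zero =>
    intro g S M hf
    omega
  | succ f ih =>
    intro g S M hf hFlips hMreach hS hclosed
    match S with
    | [] =>
      rw [loopA]
      have Mfull : ∀ c, ReachL g0 (nbrs s.1 s.2) c → M c := by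
        intro c h
        induction h with
        | base hm hw ho =>
          rename_i c'
          by_contra hnm
          exact hclosed c' s hw ho hnm hm (Or.inr rfl) (List.not_mem_nil)
        | step hd hn hw ho ihm =>
          rename_i d c'
          by_contra hnm
          exact hclosed c' d hw ho hnm hn (Or.inl ihm) (List.not_mem_nil)
      intro c hw
      exact ⟨fun hr => (hFlips c hw).1 (Mfull c hr),
        fun hnr => (hFlips c hw).2 (fun hm => hnr (hMreach c hm))⟩
    | (i, j) :: rest =>
      rw [loopA]
      have hpw : (dirsA.map fun d => (i + d.1, j + d.2)).Pairwise (· ≠ ·) := by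
        rw [dirsA_shift]
        exact nbrs_pairwise i j
      obtain ⟨E1, E2, E3, E4⟩ := expand_spec i j dirsA g hpw
      rw [dirsA_shift] at E1 E2
      have hpop : M (i, j) ∨ (i, j) = s := hS (i, j) List.mem_cons_self
      set ns := (expand g i j dirsA).2 with hns
      set g' := (expand g i j dirsA).1 with hg'
      -- facts about ns cells in g0
      have hns0 : ∀ c ∈ ns, Win c ∧ ¬ M c ∧ gAt g0 c.1 c.2 = "o" ∧ c ∈ nbrs i j := by
        intro c hc
        obtain ⟨hw, ho, hm⟩ := E1 c hc
        have hnm : ¬ M c := by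
          intro hmc
          rw [(hFlips c hw).1 hmc] at ho
          simp at ho
        refine ⟨hw, hnm, ?_, hm⟩
        rw [← (hFlips c hw).2 hnm]
        exact ho
      apply ih g' (ns.foldl PySem.Set.add rest) (fun c => M c ∨ c ∈ ns)
      · have := len_foldl_add ns rest
        simp only [List.length_cons] at hf
        omega
      · intro c hw
        constructor
        · rintro (hm | hm)
          · by_cases hcm : c ∈ ns
            · rw [E3 c hw, if_pos hcm]
            · rw [E3 c hw, if_neg hcm]
              exact (hFlips c hw).1 hm
          · rw [E3 c hw, if_pos hm]
        · intro hnm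
          push Not at hnm
          rw [E3 c hw, if_neg hnm.2]
          exact (hFlips c hw).2 hnm.1
      · rintro c (hm | hm)
        · exact hMreach c hm
        · obtain ⟨hw, _, ho0, hmem⟩ := hns0 c hm
          rcases hpop with hmp | rfl
          · exact ReachL.step (hMreach _ hmp) hmem hw ho0
          · exact ReachL.base hmem hw ho0
      · intro c hc
        rcases (mem_foldl_add ns rest c).1 hc with hcr | hcn
        · rcases hS c (List.mem_cons_of_mem _ hcr) with hm | he
          · exact Or.inl (Or.inl hm)
          · exact Or.inr he
        · exact Or.inl (Or.inr hcn)
      · intro c d hw ho0 hnm hadj hd hdS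
        push Not at hnm
        rw [mem_foldl_add] at hdS
        push Not at hdS
        rcases hd with (hmd | hdn) | hde
        · by_cases hdij : d = (i, j)
          · subst hdij
            refine hnm.2 (E2 c hadj hw ?_)
            rw [← (hFlips c hw).2 hnm.1] at ho0
            exact ho0
          · exact hclosed c d hw ho0 hnm.1 hadj (Or.inl hmd)
              (by
                intro hmem
                rcases List.mem_cons.1 hmem with h | h
                · exact hdij h
                · exact hdS.1 h)
        · exact hdS.2 hdn
        · by_cases hdij : d = (i, j)
          · subst hdij
            refine hnm.2 (E2 c hadj hw ?_)
            rw [← (hFlips c hw).2 hnm.1] at ho0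
            exact ho0
          · exact hclosed c d hw ho0 hnm.1 hadj (Or.inr hde)
              (by
                intro hmem
                rcases List.mem_cons.1 hmem with h | h
                · exact hdij h
                · exact hdS.1 h)

theorem checkLandRow_eq (g : List (List String)) (i : Int) (js : List Int) :
    checkLandRow g i js = js.find? (fun j => gAt g i j == "o") := by
  induction js with
  | nil => rfl
  | cons j js ih =>
    rw [checkLandRow, List.find?_cons]
    by_cases h : (gAt g i j == "o") = true
    · simp [h]
    · simp only [Bool.not_eq_true] at h
      simp [h, ih]

theorem checkLandGo_eq (g : List (List String)) (is : List Int) :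
    checkLandGo g is =
      match (is.flatMap fun i => (PySem.List.pyRange 0 10 1).map fun j => ((i, j) : Int × Int)).find?
          (fun c => gAt g c.1 c.2 == "o") with
      | some c => [c.1, c.2]
      | none => [] := by
  induction is with
  | nil => rfl
  | cons i is ih =>
    rw [checkLandGo, List.flatMap_cons, List.find?_append, List.find?_map]
    have hrow := checkLandRow_eq g i (PySem.List.pyRange 0 10 1)
    rw [hrow]
    have hcomp : ((fun c : Int × Int => gAt g c.1 c.2 == "o") ∘ fun j => ((i, j) : Int × Int)) =
        fun j => gAt g i j == "o" := rfl
    rw [hcomp]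
    cases hfr : (PySem.List.pyRange 0 10 1).find? (fun j => gAt g i j == "o") with
    | some j => simp
    | none => simpa using ih

theorem checkLand_eq_find (g : List (List String)) :
    checkLand g = match findLand g with
      | some c => [c.1, c.2]
      | none => [] := by
  rw [checkLand, checkLandGo_eq]
  rfl

theorem mem_cellsB {c : Int × Int} : c ∈ cellsB ↔ Win c := by
  simp only [cellsB, List.mem_flatMap, List.mem_map, PySem.List.mem_pyRange_one]
  constructor
  · rintro ⟨i, ⟨hi0, hi10⟩, j, ⟨hj0, hj10⟩, rfl⟩
    exact ⟨hi0, hi10, hj0, hj10⟩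
  · rintro ⟨h1, h2, h3, h4⟩
    exact ⟨c.1, ⟨h1, h2⟩, c.2, ⟨h3, h4⟩, Prod.mk.eta⟩

-- ===== VERDICT (by name: the statement is the Claim_ definition above) =====
theorem dfs_spec : Claim_equal_dfs := by
  intro map_ _ hpre
  unfold Spec_dfs
  obtain ⟨s, hfind⟩ : ∃ s, findLand map_ = some s := by
    rw [← Option.isSome_iff_exists]
    rw [findLand, List.find?_isSome]
    obtain ⟨i, hi, j, hj, ho⟩ :
        ∃ i ∈ List.range 10, ∃ j ∈ List.range 10, (map_.getD i []).getD j "" = "o" := by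
      rcases hpre with ⟨_, _, h⟩ | ⟨t, ht, l, hl, _, _, _, hcell, _⟩
      · exact h
      · exact ⟨t, ht, l, hl, hcell⟩
    simp only [List.mem_range] at hi hj
    refine ⟨((i : Int), (j : Int)), mem_cellsB.2 ⟨by omega, by omega, by omega, by omega⟩, ?_⟩
    simp only [gAt, PySem.List.pyGetD_of_nonneg _ _ (by omega : (0:Int) ≤ (i : Int)),
      PySem.List.pyGetD_of_nonneg _ _ (by omega : (0:Int) ≤ (j : Int)), Int.toNat_natCast]
    simpa using ho
  obtain ⟨s1, s2⟩ := s
  have hps : gAt map_ s1 s2 = "o" := by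
    have := List.find?_some hfind
    simpa using this
  have hws : Win (s1, s2) := mem_cellsB.1 (List.mem_of_find?_eq_some hfind)
  have hCL : checkLand map_ = [s1, s2] := by
    rw [checkLand_eq_find, hfind]
  have hA : dfs map_ =
      (if checkLand (loopA (2 * countO map_ + 2) map_ [(s1, s2)]) = [] then true else false) := by
    rw [dfs, hCL]
    rfl
  have hB : dfs_alt map_ =
      !(cellsB.any fun c => gAt (floodGo (5 * countO map_ + 4) map_ (nbrs s1 s2)) c.1 c.2 == "o") := by
    rw [dfs_alt, hfind]
  set GA := loopA (2 * countO map_ + 2) map_ [(s1, s2)] with hGA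
  set GB := floodGo (5 * countO map_ + 4) map_ (nbrs s1 s2) with hGB
  have FA : Flips map_ GA (ReachL map_ (nbrs s1 s2)) := by
    apply loopA_char map_ (s1, s2) (2 * countO map_ + 2) map_ [(s1, s2)] (fun _ => False)
    · simp
    · intro c hw
      exact ⟨False.elim, fun _ => rfl⟩
    · intro c h
      exact h.elim
    · intro c hc
      exact Or.inr (by simpa using hc)
    · intro c d _ _ _ _ hd hdS
      rcases hd with h | rfl
      · exact h
      · exact hdS List.mem_cons_self
  have FB : Flips map_ GB (ReachL map_ (nbrs s1 s2)) := by
    apply flood_char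
    simp [nbrs]
  have hpt : ∀ c : Int × Int, Win c → gAt GA c.1 c.2 = gAt GB c.1 c.2 := by
    intro c hw
    by_cases hr : ReachL map_ (nbrs s1 s2) c
    · rw [(FA c hw).1 hr, (FB c hw).1 hr]
    · rw [(FA c hw).2 hr, (FB c hw).2 hr]
  rw [hA, hB]
  by_cases hall : ∀ c ∈ cellsB, ¬ (gAt GB c.1 c.2 = "o")
  · have hanyf : (cellsB.any fun c => gAt GB c.1 c.2 == "o") = false := by
      rw [List.any_eq_false]
      intro c hc
      simpa using hall c hc
    have hnone : findLand GA = none := by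
      rw [findLand, List.find?_eq_none]
      intro c hc
      have := hall c hc
      rw [← hpt c (mem_cellsB.1 hc)] at this
      simpa using this
    rw [checkLand_eq_find, hnone, hanyf]
    rfl
  · push Not at hall
    obtain ⟨c, hc, hco⟩ := hall
    have hanyt : (cellsB.any fun c => gAt GB c.1 c.2 == "o") = true := by
      rw [List.any_eq_true]
      exact ⟨c, hc, by simpa using hco⟩
    have hsome : checkLand GA ≠ [] := by
      rw [checkLand_eq_find]
      have hex : (cellsB.find? fun c => gAt GA c.1 c.2 == "o").isSome := by
        rw [List.find?_isSome]
        refine ⟨c, hc, ?_⟩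
        rw [hpt c (mem_cellsB.1 hc)]
        simpa using hco
      obtain ⟨c', hc'⟩ := Option.isSome_iff_exists.1 hex
      rw [findLand, hc']
      simp
    rw [if_neg hsome, hanyt]
    rfl
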